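-- pv_equiv track=rewrite | github.com/Javitronxo/AdventOfCode | 2015/day_25.py | generate_infinite_paper
-- ===== SOURCE A (Python) =====
-- from typing import Dict, List
-- from collections import defaultdict
--
-- def generate_infinite_paper(end_row: int, end_column: int) -> Dict[int, List[int]]:
--     step = 0
--     final_step = end_row + end_column
--     paper = defaultdict(list)
--
--     current_cell = 20151125
--     while step < final_step:
--         for i in range(step + 1):
--             row = step - i
--             paper[row].append(current_cell)
--             current_cell = (current_cell * 252533) % 33554393
--         step += 1
--
--     return paper
-- ===== SOURCE B (Python) =====
-- from typing import Dict, List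
-- from collections import defaultdict
--
--
-- def generate_infinite_paper(end_row: int, end_column: int) -> Dict[int, List[int]]:
--     final_step = end_row + end_column
--     paper = defaultdict(list)
--     for r in range(final_step):
--         # first cell of row r sits at global diagonal index r*(r+1)//2
--         v = 20151125 * pow(252533, r * (r + 1) // 2, 33554393) % 33554393
--         m = pow(252533, r + 2, 33554393)
--         row = []
--         for _ in range(final_step - r):
--             row.append(v)
--             v = v * m % 33554393
--             m = m * 252533 % 33554393
--         paper[r] = row
--     return paper
-- ===== Notes on version B (the rewrite author's own statement) =====
-- stated objective: alternative
-- what changed: B fills the dict row by row: each row's first value is obtained by modular exponentiation from its closed-form diagonal index r*(r+1)//2 and the rest by a stride multiplier, instead of A's single running product threaded through nested diagonal loops.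
import Mathlib
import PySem

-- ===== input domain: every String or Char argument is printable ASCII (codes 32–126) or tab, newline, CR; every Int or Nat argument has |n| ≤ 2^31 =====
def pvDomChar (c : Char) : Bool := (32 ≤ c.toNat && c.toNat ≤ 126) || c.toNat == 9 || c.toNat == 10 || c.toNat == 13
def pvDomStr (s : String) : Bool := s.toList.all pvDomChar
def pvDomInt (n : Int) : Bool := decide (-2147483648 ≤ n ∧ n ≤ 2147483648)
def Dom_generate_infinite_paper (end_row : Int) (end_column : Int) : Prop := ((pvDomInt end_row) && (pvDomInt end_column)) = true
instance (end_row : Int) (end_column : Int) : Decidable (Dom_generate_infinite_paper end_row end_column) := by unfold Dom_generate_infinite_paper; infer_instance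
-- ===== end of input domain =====

-- B computes each cell directly by modular exponentiation from its diagonal index instead of
-- threading one running product through nested diagonal loops (objective: alternative algorithm).


-- ===== PORT A =====
-- the while loop: state = (paper, current_cell); inner 'for i in range(step+1)' is a foldl
def gipLoop (final_step : Int) (step : Int)
    (st : PySem.Dict Int (List Int) × Int) : PySem.Dict Int (List Int) × Int :=
  if _h : step < final_step then
    gipLoop final_step (step + 1)
      ((PySem.List.pyRange 0 (step + 1) 1).foldl
        (fun st i =>
          let row := step - i
          -- paper[row].append(current_cell) on a defaultdict(list) is Dict.modify row [] (· ++ [cell])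
          (st.1.modify row [] (fun l => l ++ [st.2]), st.2 * 252533 % 33554393))
        st)
  else st
termination_by (final_step - step).toNat
decreasing_by omega

def generate_infinite_paper (end_row : Int) (end_column : Int) : List (Int × List Int) :=
  let final_step := end_row + end_column
  ((gipLoop final_step 0 (PySem.Dict.empty, 20151125)).1).items

-- ===== PORT B =====
def generate_infinite_paper_alt (end_row : Int) (end_column : Int) : List (Int × List Int) :=
  let final_step := end_row + end_column
  ((PySem.List.pyRange 0 final_step 1).foldl
    (fun paper r =>
      paper.insert r
        (((PySem.List.pyRange 0 (final_step - r) 1).foldl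
            (fun (st : List Int × Int × Int) (_ : Int) =>
              (st.1 ++ [st.2.1], st.2.1 * st.2.2 % 33554393, st.2.2 * 252533 % 33554393))
            (([] : List Int),
             20151125 * ((252533 : Int) ^ (PySem.Int.floordiv (r * (r + 1)) 2).toNat % 33554393) % 33554393,
             (252533 : Int) ^ (r + 2).toNat % 33554393)).1))
    PySem.Dict.empty).items

-- ===== PRECONDITION & SPEC =====
def Spec_generate_infinite_paper (end_row : Int) (end_column : Int) (out : List (Int × List Int)) : Prop := out = generate_infinite_paper_alt end_row end_column
instance (end_row : Int) (end_column : Int) (out : List (Int × List Int)) : Decidable (Spec_generate_infinite_paper end_row end_column out) := by unfold Spec_generate_infinite_paper; infer_instance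

-- ===== CLAIM (what is proved, stated in full; the proofs are below) =====
def Claim_equal_generate_infinite_paper : Prop := ∀ (end_row : Int) (end_column : Int), Dom_generate_infinite_paper end_row end_column → Spec_generate_infinite_paper end_row end_column (generate_infinite_paper end_row end_column)

-- ===== LEMMAS AND PROOFS =====

-- triangular number, the value sequence, and the cell closed form
def pvT (d : Nat) : Nat := d * (d + 1) / 2
def pvC (n : Nat) : Int := (20151125 * 252533 ^ n) % 33554393
def pvCell (r j : Nat) : Int := pvC (pvT (r + j) + j)
def pvRow (len r : Nat) : List Int := (List.range len).map (fun j => pvCell r j)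
def pvItems (k : Nat) : List (Int × List Int) :=
  (List.range k).map (fun (r : Nat) => ((r : Int), pvRow (k - r) r))
-- items after m iterations of the inner loop of diagonal k (rows k, k-1, …, k-m+1 touched)
def pvMid (k m : Nat) : List (Int × List Int) :=
  (List.range k).map (fun (r : Nat) => ((r : Int), pvRow (if k < m + r then k + 1 - r else k - r) r))
    ++ (if m = 0 then [] else [((k : Int), pvRow 1 k)])

theorem pvT_succ (k : Nat) : pvT (k + 1) = pvT k + (k + 1) := by
  unfold pvT
  have h : (k + 1) * (k + 1 + 1) = k * (k + 1) + 2 * (k + 1) := by ring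
  rw [h, Nat.add_mul_div_left _ _ (by norm_num : 0 < 2)]

theorem pvC_succ (n : Nat) : pvC n * 252533 % 33554393 = pvC (n + 1) := by
  unfold pvC
  conv_lhs => rw [Int.mul_emod, Int.emod_emod_of_dvd _ dvd_rfl, ← Int.mul_emod]
  rw [pow_succ, mul_assoc]

theorem pvC_mulmod (n : Nat) :
    (20151125 * ((252533 : Int) ^ n % 33554393)) % 33554393 = pvC n := by
  unfold pvC
  conv_lhs => rw [Int.mul_emod, Int.emod_emod_of_dvd _ dvd_rfl, ← Int.mul_emod]

theorem pvMid_zero (k : Nat) : pvMid k 0 = pvItems k := by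
  unfold pvMid pvItems
  simp only [reduceIte, List.append_nil]
  exact List.map_congr_left (fun r hr => by
    have := List.mem_range.mp hr
    rw [if_neg (by omega)])

theorem pvMid_last (k : Nat) : pvMid k (k + 1) = pvItems (k + 1) := by
  unfold pvMid pvItems
  rw [if_neg (by omega : ¬ k + 1 = 0), List.range_succ, List.map_append]
  congr 1
  · exact List.map_congr_left (fun r hr => by
      have := List.mem_range.mp hr
      rw [if_pos (by omega)])
  · simp [pvRow]

theorem pvMid_keys (k m : Nat) :
    (pvMid k m).map Prod.fst
      = (List.range k).map (fun (r : Nat) => (r : Int)) ++ (if m = 0 then [] else [(k : Int)]) := by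
  unfold pvMid
  rcases Nat.eq_zero_or_pos m with h | h
  · subst h; simp [List.map_map, Function.comp]
  · rw [if_neg (by omega), if_neg (by omega)]
    simp [List.map_map, Function.comp]

theorem pvMid_keys_nodup (k m : Nat) : ((pvMid k m).map Prod.fst).Nodup := by
  rw [pvMid_keys]
  have hbase : ((List.range k).map (fun (r : Nat) => (r : Int))).Nodup :=
    (List.nodup_range).map (fun a b h => by exact_mod_cast h)
  rcases Nat.eq_zero_or_pos m with h | h
  · subst h; simpa using hbase
  · rw [if_neg (by omega), List.nodup_append]
    refine ⟨hbase, List.nodup_singleton _, ?_⟩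
    intro x hx b hb
    simp only [List.mem_map, List.mem_range] at hx
    obtain ⟨r, hr, rfl⟩ := hx
    have hbk : b = (k : Int) := by simpa using hb
    omega

-- one inner iteration: i = m, row = k - m, appended value pvC (pvT k + m)
theorem pvInner_step (k m : Nat) (hm : m ≤ k) :
    (PySem.Dict.mk (pvMid k m)).modify ((k : Int) - (m : Int)) []
        (fun l => l ++ [pvC (pvT k + m)]) = PySem.Dict.mk (pvMid k (m + 1)) := by
  rcases Nat.eq_zero_or_pos m with h0 | h0
  · -- m = 0 : new key ↑k appended at the end
    subst h0
    rw [PySem.Dict.modify]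
    simp only [Nat.cast_zero, sub_zero]
    have hnc : (PySem.Dict.mk (pvMid k 0)).contains ((k : Int)) = false := by
      rw [← Bool.not_eq_true, PySem.Dict.contains_iff_mem_keys]
      show ¬ ((k:Int) ∈ (PySem.Dict.mk (pvMid k 0)).keys)
      have : (PySem.Dict.mk (pvMid k 0)).keys = (pvMid k 0).map Prod.fst := rfl
      rw [this, pvMid_keys]
      simp only [reduceIte, List.append_nil, List.mem_map, List.mem_range]
      rintro ⟨r, hr, hx⟩
      have : r = k := by exact_mod_cast hx
      omega
    rw [PySem.Dict.getD_of_not_contains _ _ hnc]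
    apply PySem.Dict.ext
    rw [PySem.Dict.items_insert_of_not_contains _ _ hnc]
    show pvMid k 0 ++ [((k:Int), [] ++ [pvC (pvT k + 0)])] = pvMid k 1
    unfold pvMid
    simp only [reduceIte, List.append_nil, if_neg (one_ne_zero)]
    rw [show ([] ++ [pvC (pvT k + 0)]) = pvRow 1 k from by simp [pvRow, pvCell]]
    congr 1
    exact List.map_congr_left (fun r hr => by
      have := List.mem_range.mp hr
      rw [if_neg (by omega), if_neg (by omega)])
  · -- m ≥ 1 : existing key ↑(k-m) updated in place
    have hkey : (k : Int) - (m : Int) = ((k - m : Nat) : Int) := by omega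
    set r0 : Nat := k - m with hr0
    have hr0k : r0 < k := by omega
    have hmem : (((r0 : Nat) : Int), pvRow m r0) ∈ pvMid k m := by
      unfold pvMid
      apply List.mem_append_left
      refine List.mem_map.mpr ⟨r0, List.mem_range.mpr hr0k, ?_⟩
      rw [if_neg (by omega)]
      congr 2
      omega
    have hnodup : (PySem.Dict.mk (pvMid k m)).keys.Nodup := pvMid_keys_nodup k m
    have hc : (PySem.Dict.mk (pvMid k m)).contains ((r0 : Nat) : Int) = true := by
      rw [PySem.Dict.contains_iff_mem_keys]
      exact List.mem_map.mpr ⟨_, hmem, rfl⟩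
    rw [PySem.Dict.modify, hkey]
    have hgd : (PySem.Dict.mk (pvMid k m)).getD ((r0 : Nat) : Int) [] = pvRow m r0 :=
      PySem.Dict.getD_of_mem_items _ hmem hnodup []
    rw [hgd]
    apply PySem.Dict.ext
    rw [PySem.Dict.items_insert_of_contains _ _ hc]
    have hrownew : pvRow m r0 ++ [pvC (pvT k + m)] = pvRow (m + 1) r0 := by
      unfold pvRow
      rw [List.range_succ, List.map_append]
      congr 1
      simp only [List.map_cons, List.map_nil]
      unfold pvCell
      have hk' : r0 + m = k := by omega
      rw [hk']
    show (pvMid k m).map _ = pvMid k (m + 1)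
    unfold pvMid
    rw [if_neg (by omega), if_neg (by omega), List.map_append, List.map_map]
    congr 1
    · apply List.map_congr_left
      intro r hr
      have hrk := List.mem_range.mp hr
      by_cases hrr : r = r0
      · subst hrr
        simp only [Function.comp, beq_self_eq_true, if_pos]
        rw [hrownew, if_pos (by omega)]
        congr 2
        omega
      · have hne : ((r : Int) == (r0 : Int)) = false := by
          simp only [beq_eq_false_iff_ne, ne_eq]
          intro hx; exact hrr (by exact_mod_cast hx)
        simp only [Function.comp, hne, Bool.false_eq_true, if_false]
        congr 2
        by_cases hcond : k < m + r
        · rw [if_pos hcond, if_pos (by omega)]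
        · rw [if_neg hcond, if_neg (by omega)]
    · have hne : (((k : Nat) : Int) == ((r0 : Nat) : Int)) = false := by
        simp only [beq_eq_false_iff_ne, ne_eq]
        intro hx
        have : k = r0 := by exact_mod_cast hx
        omega
      simp only [List.map_cons, List.map_nil, hne, Bool.false_eq_true, if_false]

theorem pvInner_aux (k : Nat) : ∀ (m : Nat), m ≤ k + 1 →
    ((List.range m).foldl
        (fun (st : PySem.Dict Int (List Int) × Int) (i : Nat) =>
          ((st.1.modify ((k : Int) - (i : Int)) [] (fun l => l ++ [st.2])),
            st.2 * 252533 % 33554393))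
        (PySem.Dict.mk (pvMid k 0), pvC (pvT k)))
      = (PySem.Dict.mk (pvMid k m), pvC (pvT k + m)) := by
  intro m
  induction m with
  | zero => intro _; simp
  | succ m ih =>
    intro hm
    rw [List.range_succ, List.foldl_append, ih (by omega)]
    simp only [List.foldl_cons, List.foldl_nil]
    rw [pvInner_step k m (by omega), pvC_succ]
    rfl

theorem pvInner_loop (k : Nat) :
    ((List.range (k + 1)).foldl
        (fun (st : PySem.Dict Int (List Int) × Int) (i : Nat) =>
          ((st.1.modify ((k : Int) - (i : Int)) [] (fun l => l ++ [st.2])),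
            st.2 * 252533 % 33554393))
        (PySem.Dict.mk (pvItems k), pvC (pvT k)))
      = (PySem.Dict.mk (pvItems (k + 1)), pvC (pvT (k + 1))) := by
  rw [← pvMid_zero, pvInner_aux k (k + 1) (le_refl _), pvMid_last, pvT_succ]

theorem pvOuter (final : Int) : ∀ (n k : Nat), n = final.toNat - k → k ≤ final.toNat →
    gipLoop final (k : Int) (PySem.Dict.mk (pvItems k), pvC (pvT k))
      = (PySem.Dict.mk (pvItems final.toNat), pvC (pvT final.toNat)) := by
  intro n
  induction n with
  | zero =>
    intro k hn hk
    have hk' : k = final.toNat := by omega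
    subst hk'
    rw [gipLoop, dif_neg (by omega)]
  | succ n ih =>
    intro k hn hk
    have hlt : (k : Int) < final := by omega
    rw [gipLoop, dif_pos hlt]
    have hbr : PySem.List.pyRange 0 ((k : Int) + 1) 1
        = (List.range (k + 1)).map (fun (j : Nat) => (0 : Int) + (j : Int)) := by
      rw [PySem.List.pyRange_one]
      congr 2
    rw [hbr, List.foldl_map]
    simp only [zero_add]
    rw [pvInner_loop k]
    have hc : (k : Int) + 1 = ((k + 1 : Nat) : Int) := by push_cast; ring
    rw [hc]
    exact ih (k + 1) (by omega) (by omega)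

theorem pvC_mul_powmod (a b : Nat) :
    pvC a * ((252533 : Int) ^ b % 33554393) % 33554393 = pvC (a + b) := by
  unfold pvC
  conv_lhs => rw [Int.mul_emod, Int.emod_emod_of_dvd _ dvd_rfl, Int.emod_emod_of_dvd _ dvd_rfl,
    ← Int.mul_emod]
  rw [mul_assoc, ← pow_add]

theorem powmod_succ (b : Nat) :
    ((252533 : Int) ^ b % 33554393) * 252533 % 33554393 = (252533 : Int) ^ (b + 1) % 33554393 := by
  conv_lhs => rw [Int.mul_emod, Int.emod_emod_of_dvd _ dvd_rfl, ← Int.mul_emod]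
  rw [← pow_succ]

theorem pvRow_snoc (m r : Nat) :
    pvRow (m + 1) r = pvRow m r ++ [pvC (pvT (r + m) + m)] := by
  unfold pvRow
  rw [List.range_succ, List.map_append]
  rfl

theorem pvRowAux (r : Nat) : ∀ (m : Nat),
    ((List.range m).foldl
        (fun (st : List Int × Int × Int) (_ : Nat) =>
          (st.1 ++ [st.2.1], st.2.1 * st.2.2 % 33554393, st.2.2 * 252533 % 33554393))
        (([] : List Int), pvC (pvT r), (252533 : Int) ^ (r + 2) % 33554393))
      = (pvRow m r, pvC (pvT (r + m) + m), (252533 : Int) ^ (r + m + 2) % 33554393) := by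
  intro m
  induction m with
  | zero => simp [pvRow, pvT]
  | succ m ih =>
    rw [List.range_succ, List.foldl_append, ih]
    simp only [List.foldl_cons, List.foldl_nil]
    rw [← pvRow_snoc, pvC_mul_powmod, powmod_succ]
    have h1 : pvT (r + m) + m + (r + m + 2) = pvT (r + (m + 1)) + (m + 1) := by
      rw [show r + (m + 1) = (r + m) + 1 from by omega, pvT_succ (r + m)]
      omega
    have h2 : r + m + 2 + 1 = r + (m + 1) + 2 := by omega
    rw [h1, h2]

theorem altItems (er ec : Int) :
    generate_infinite_paper_alt er ec = pvItems ((er + ec).toNat) := by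
  unfold generate_infinite_paper_alt
  rw [PySem.Dict.items_foldl_insert_fresh _ (fun r => r) _ _
        (fun a _ => PySem.Dict.contains_empty a)
        (by simpa using PySem.List.nodup_pyRange_one 0 (er + ec))]
  show [] ++ _ = _
  rw [List.nil_append, PySem.List.pyRange_one, List.map_map]
  have hFe : ((er + ec) - 0).toNat = (er + ec).toNat := by omega
  rw [hFe]
  unfold pvItems
  apply List.map_congr_left
  intro r hr
  have hrF := List.mem_range.mp hr
  simp only [Function.comp, zero_add]
  have hseed : (20151125 * ((252533 : Int) ^ (PySem.Int.floordiv ((r : Int) * ((r : Int) + 1)) 2).toNat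
      % 33554393)) % 33554393 = pvC (pvT r) := by
    have h1 : (r : Int) * ((r : Int) + 1) = ((r * (r + 1) : Nat) : Int) := by push_cast; ring
    have h3 : PySem.Int.floordiv (((r * (r + 1) : Nat)) : Int) 2 = ((r * (r + 1) / 2 : Nat) : Int) := by
      exact_mod_cast PySem.Int.floordiv_natCast (r * (r + 1)) 2
    rw [h1, h3, Int.toNat_natCast]
    exact pvC_mulmod _
  have hm2 : ((r : Int) + 2).toNat = r + 2 := by omega
  have hcnt : (er + ec) - ((r : Nat) : Int) = (((er + ec).toNat - r : Nat) : Int) := by omega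
  rw [hseed, hm2, hcnt, PySem.List.pyRange_one, List.foldl_map]
  have hc2 : ((((er + ec).toNat - r : Nat) : Int) - 0).toNat = (er + ec).toNat - r := by omega
  rw [hc2, pvRowAux r ((er + ec).toNat - r)]

-- ===== VERDICT (by name: the statement is the Claim_ definition above) =====
theorem generate_infinite_paper_spec : Claim_equal_generate_infinite_paper := by
  intro er ec _
  show generate_infinite_paper er ec = generate_infinite_paper_alt er ec
  rw [altItems]
  unfold generate_infinite_paper
  have h0 : (PySem.Dict.empty : PySem.Dict Int (List Int)) = PySem.Dict.mk (pvItems 0) := by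
    simp [PySem.Dict.empty, pvItems]
  have h1 : (20151125 : Int) = pvC (pvT 0) := by decide
  simp only [h0, h1]
  have h2 := pvOuter (er + ec) ((er + ec).toNat) 0 (by omega) (Nat.zero_le _)
  simp only [Nat.cast_zero] at h2
  rw [h2]
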